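-- pv_equiv track=rewrite | github.com/afonsof3rreira/MIALab | bin/my_hog.py | nr_of_blocks
-- ===== SOURCE A (Python) =====
-- def nr_of_blocks(img_arr_shape, block_size, block_displacement):
--     #   Calculating nr of blocks from which to extract image histograms
--     # maximal coordinates that can be reached (inclusive)
--     or_z = img_arr_shape[0] - 1
--     or_y = img_arr_shape[1] - 1
--     or_x = img_arr_shape[2] - 1
--     # starting coordinates
--     z, y, x = 0, 0, 0
--     # centered starting coordinates in the padded image = origin of the original image
--     cent_z, cent_y, cent_x = (block_size // 2), (block_size // 2), (block_size // 2)
--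
--     while cent_z <= or_z + (block_size // 2) - block_displacement:
--         cent_z += block_displacement
--         z += 1
--     nr_block_z = z + 1
--
--     while cent_y <= or_y + (block_size // 2) - block_displacement:
--         cent_y += block_displacement
--         y += 1
--     nr_block_y = y + 1
--
--     while cent_x <= or_x + (block_size // 2) - block_displacement:
--         cent_x += block_displacement
--         x += 1
--     nr_block_x = x + 1
--
--     return [nr_block_z, nr_block_y, nr_block_x]
-- ===== SOURCE B (Python) =====
-- def nr_of_blocks(img_arr_shape, block_size, block_displacement):
--     # Closed form: each while-loop in the original runs
--     # max(0, (s - 1 - d) // d + 1) times for dimension size s, stride d.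
--     d = block_displacement
--     dims = (img_arr_shape[0], img_arr_shape[1], img_arr_shape[2])
--     return [max(0, (s - 1 - d) // d + 1) + 1 for s in dims]
-- ===== Notes on version B (the rewrite author's own statement) =====
-- stated objective: alternative
-- what changed: Each of A's three step-by-step counting while loops is replaced by a closed-form floor-division formula for its iteration count, applied by a single map over the three dimension sizes.
-- outside the precondition, e.g. on nr_of_blocks([-5, -5, -5], 4, -2): A returns [1, 1, 1], B returns [4, 4, 4]
import Mathlib
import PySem

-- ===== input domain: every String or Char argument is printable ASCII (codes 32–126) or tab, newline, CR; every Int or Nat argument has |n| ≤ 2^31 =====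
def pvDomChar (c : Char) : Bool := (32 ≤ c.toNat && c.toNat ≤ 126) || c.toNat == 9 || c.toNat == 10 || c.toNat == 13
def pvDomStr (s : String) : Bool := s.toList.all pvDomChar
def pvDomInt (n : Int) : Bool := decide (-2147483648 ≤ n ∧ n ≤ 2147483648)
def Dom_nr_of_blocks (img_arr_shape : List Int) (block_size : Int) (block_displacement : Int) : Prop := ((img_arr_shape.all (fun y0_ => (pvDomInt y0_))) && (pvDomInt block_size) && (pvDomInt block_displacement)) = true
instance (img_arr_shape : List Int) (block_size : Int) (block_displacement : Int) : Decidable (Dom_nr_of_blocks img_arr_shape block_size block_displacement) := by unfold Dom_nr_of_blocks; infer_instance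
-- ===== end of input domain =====

-- B replaces A's three counting while-loops by one closed-form floor-division formula
-- mapped over the three dimension sizes (loop-free alternative; return value only).

-- ===== PORT A =====
-- one of A's while-loops: counts steps while cent ≤ bound, stepping cent by d.
-- The '0 < d' conjunct is a totality guard only: for d ≤ 0 with cent ≤ bound the Python loop
-- diverges (such inputs are outside Pre_); for d ≤ 0 with cent > bound both exit immediately.
def pvLoop (bound d cent ctr : Int) : Int :=
  if h : cent ≤ bound ∧ 0 < d then pvLoop bound d (cent + d) (ctr + 1) else ctr
termination_by (bound + 1 - cent).toNat
decreasing_by omega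

def nr_of_blocks (img_arr_shape : List Int) (block_size : Int) (block_displacement : Int) : List Int :=
  let or_z := PySem.List.pyGetD img_arr_shape 0 0 - 1
  let or_y := PySem.List.pyGetD img_arr_shape 1 0 - 1
  let or_x := PySem.List.pyGetD img_arr_shape 2 0 - 1
  let cent := PySem.Int.floordiv block_size 2
  let nr_block_z := pvLoop (or_z + cent - block_displacement) block_displacement cent 0 + 1
  let nr_block_y := pvLoop (or_y + cent - block_displacement) block_displacement cent 0 + 1
  let nr_block_x := pvLoop (or_x + cent - block_displacement) block_displacement cent 0 + 1
  [nr_block_z, nr_block_y, nr_block_x]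

-- ===== PORT B =====
def nr_of_blocks_alt (img_arr_shape : List Int) (block_size : Int) (block_displacement : Int) : List Int :=
  [PySem.List.pyGetD img_arr_shape 0 0, PySem.List.pyGetD img_arr_shape 1 0,
   PySem.List.pyGetD img_arr_shape 2 0].map
    (fun s => max 0 (PySem.Int.floordiv (s - 1 - block_displacement) block_displacement + 1) + 1)

-- ===== PRECONDITION & SPEC =====
-- Pre_ requires a shape of length ≥ 3 (A raises IndexError otherwise) and a positive
-- displacement: for block_displacement ≤ 0 A's loops diverge on every input except the
-- degenerate all-negative-shape corner (all entries ≤ displacement), where A's [1,1,1]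
-- is an accident of the never-entered loop condition; that corner is excluded.
def Pre_nr_of_blocks (img_arr_shape : List Int) (block_size : Int) (block_displacement : Int) : Prop :=
  3 ≤ img_arr_shape.length ∧ 0 < block_displacement
instance (img_arr_shape : List Int) (block_size : Int) (block_displacement : Int) : Decidable (Pre_nr_of_blocks img_arr_shape block_size block_displacement) := by unfold Pre_nr_of_blocks; infer_instance

def pvWitness_nr_of_blocks : List Int × Int × Int := ([10, 8, 6], 4, 2)


def Spec_nr_of_blocks (img_arr_shape : List Int) (block_size : Int) (block_displacement : Int) (out : List Int) : Prop := out = nr_of_blocks_alt img_arr_shape block_size block_displacement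
instance (img_arr_shape : List Int) (block_size : Int) (block_displacement : Int) (out : List Int) : Decidable (Spec_nr_of_blocks img_arr_shape block_size block_displacement out) := by unfold Spec_nr_of_blocks; infer_instance

-- ===== CLAIM (what is proved, stated in full; the proofs are below) =====
def Claim_equal_nr_of_blocks : Prop := ∀ (img_arr_shape : List Int) (block_size : Int) (block_displacement : Int), Dom_nr_of_blocks img_arr_shape block_size block_displacement → Pre_nr_of_blocks img_arr_shape block_size block_displacement → Spec_nr_of_blocks img_arr_shape block_size block_displacement (nr_of_blocks img_arr_shape block_size block_displacement)

-- ===== LEMMAS AND PROOFS =====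

-- A's loop in closed form (for positive step d).
theorem pvLoop_eq (n : Nat) : ∀ (bound d cent ctr : Int), 0 < d →
    (bound + 1 - cent).toNat ≤ n →
    pvLoop bound d cent ctr = ctr + max 0 ((bound - cent) / d + 1) := by
  induction n with
  | zero =>
    intro bound d cent ctr hd hn
    rw [pvLoop]
    have hc : ¬ cent ≤ bound := by omega
    simp only [hc, false_and, dite_false]
    have hneg : (bound - cent) / d < 0 := Int.ediv_neg_of_neg_of_pos (by omega) hd
    omega
  | succ n ih =>
    intro bound d cent ctr hd hn
    rw [pvLoop]
    by_cases hc : cent ≤ bound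
    · simp only [hc, hd, and_true, true_and, dite_true]
      rw [ih bound d (cent + d) (ctr + 1) hd (by omega)]
      have hq : 0 ≤ (bound - cent) / d := Int.ediv_nonneg (by omega) (by omega)
      have hstep : (bound - (cent + d)) / d = (bound - cent) / d + (-1) := by
        rw [show bound - (cent + d) = (bound - cent) + (-1) * d by ring,
            Int.add_mul_ediv_right _ _ (by omega : d ≠ 0)]
      rw [hstep]
      omega
    · simp only [hc, false_and, dite_false]
      have hneg : (bound - cent) / d < 0 := Int.ediv_neg_of_neg_of_pos (by omega) hd
      omega

theorem pvLoop_closed (bound d cent ctr : Int) (hd : 0 < d) :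
    pvLoop bound d cent ctr = ctr + max 0 ((bound - cent) / d + 1) :=
  pvLoop_eq (bound + 1 - cent).toNat bound d cent ctr hd le_rfl

-- ===== VERDICT (by name: the statement is the Claim_ definition above) =====
theorem nr_of_blocks_spec : Claim_equal_nr_of_blocks := by
  intro shape bs d _ hpre
  obtain ⟨hlen, hd⟩ := hpre
  match shape, hlen with
  | a :: b :: c :: t, _ =>
    show nr_of_blocks (a :: b :: c :: t) bs d = nr_of_blocks_alt (a :: b :: c :: t) bs d
    have hfd : ∀ x : Int, PySem.Int.floordiv x d = x / d := fun x =>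
      PySem.Int.floordiv_eq_ediv_of_pos hd
    simp only [nr_of_blocks, nr_of_blocks_alt]
    rw [pvLoop_closed _ _ _ _ hd, pvLoop_closed _ _ _ _ hd, pvLoop_closed _ _ _ _ hd]
    have h0 : PySem.List.pyGetD (a :: b :: c :: t) 0 0 = a := by simp [pysem]
    have h1 : PySem.List.pyGetD (a :: b :: c :: t) 1 0 = b := by simp [pysem]
    have h2 : PySem.List.pyGetD (a :: b :: c :: t) 2 0 = c := by simp [pysem]
    rw [h0, h1, h2]
    simp only [List.map_cons, List.map_nil, hfd]
    ring_nf
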